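-- pv_equiv track=rewrite | github.com/GJZ26/Genetic-Algorithm | ag.py | exchange_information
-- ===== SOURCE A (Python) =====
-- def exchange_information(bin1, bin2, indexes):
--     if len(bin1) != len(bin2):
--         raise ValueError("Las cadenas deben tener la misma longitud.")
--     result_chars = list(bin1)
--
--     for index in indexes:
--         if 0 <= index < len(bin1):
--             result_chars[index] = bin2[index]
--         else:
--             raise ValueError("Índice fuera de rango.")
--
--     return ''.join(result_chars)
-- ===== SOURCE B (Python) =====
-- def exchange_information(bin1, bin2, indexes):
--     if len(bin1) != len(bin2):
--         raise ValueError("Las cadenas deben tener la misma longitud.")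
--     if any(not (0 <= i < len(bin1)) for i in indexes):
--         raise ValueError("Índice fuera de rango.")
--     idx = set(indexes)
--     return ''.join(bin2[i] if i in idx else bin1[i] for i in range(len(bin1)))
-- ===== Notes on version B (the rewrite author's own statement) =====
-- stated objective: alternative
-- what changed: B validates all indexes up front, builds a set of them once, and constructs the result by a single comprehension over output positions with a set membership test, instead of copying bin1 into a list and mutating it index by index.
import Mathlib
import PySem

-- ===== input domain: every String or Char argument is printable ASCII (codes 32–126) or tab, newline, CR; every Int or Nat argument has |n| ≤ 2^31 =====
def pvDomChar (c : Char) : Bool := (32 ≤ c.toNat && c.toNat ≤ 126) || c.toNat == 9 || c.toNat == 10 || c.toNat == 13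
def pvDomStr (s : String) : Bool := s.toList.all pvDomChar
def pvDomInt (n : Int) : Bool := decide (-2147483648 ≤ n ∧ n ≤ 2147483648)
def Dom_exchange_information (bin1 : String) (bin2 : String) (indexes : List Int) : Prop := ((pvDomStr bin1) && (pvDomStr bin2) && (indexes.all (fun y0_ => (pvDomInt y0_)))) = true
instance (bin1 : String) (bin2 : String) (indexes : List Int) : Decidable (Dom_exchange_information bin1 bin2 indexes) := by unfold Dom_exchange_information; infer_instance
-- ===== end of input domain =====

-- B validates all indexes up front, builds a set of them once, and constructs the result
-- by a single map over output positions with a set membership test, instead of copying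
-- bin1 into a mutable list updated index by index (objective: alternative decomposition).

-- ===== PORT A =====
-- the for-loop over indexes, mutating result_chars; an out-of-range index raises
-- (modelled as returning []; such inputs are excluded by Pre_)
def exchangeLoopA (chars : List Char) (bin2 : List Char) (idxs : List Int) : List Char :=
  match idxs with
  | [] => chars
  | i :: rest =>
      if 0 ≤ i ∧ i < (chars.length : Int) then
        exchangeLoopA (PySem.List.pySetD chars i ((PySem.List.pyGet? bin2 i).getD ' ')) bin2 rest
      else []  -- raise ValueError("Índice fuera de rango.")

def exchange_information (bin1 : String) (bin2 : String) (indexes : List Int) : String :=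
  if bin1.toList.length ≠ bin2.toList.length then ""  -- raise ValueError (excluded by Pre_)
  else String.mk (exchangeLoopA bin1.toList bin2.toList indexes)

-- ===== PORT B =====
def exchange_information_alt (bin1 : String) (bin2 : String) (indexes : List Int) : String :=
  if bin1.toList.length ≠ bin2.toList.length then ""  -- raise ValueError (excluded by Pre_)
  else if indexes.any (fun i => ¬ (0 ≤ i ∧ i < (bin1.toList.length : Int))) then ""  -- raise ValueError (excluded by Pre_)
  else
    let idx : PySem.Set Int := PySem.Set.ofList indexes
    String.mk ((List.range bin1.toList.length).map (fun (k : Nat) =>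
      if PySem.Set.contains idx ((k : Int)) then (PySem.List.pyGet? bin2.toList ((k : Int))).getD ' '
      else (PySem.List.pyGet? bin1.toList ((k : Int))).getD ' '))

-- ===== PRECONDITION & SPEC =====
-- Pre_ excludes exactly the inputs on which A raises ValueError: unequal lengths, or an index outside [0, len(bin1))
def Pre_exchange_information (bin1 : String) (bin2 : String) (indexes : List Int) : Prop :=
  bin1.toList.length = bin2.toList.length ∧ ∀ i ∈ indexes, 0 ≤ i ∧ i < (bin1.toList.length : Int)
instance (bin1 : String) (bin2 : String) (indexes : List Int) : Decidable (Pre_exchange_information bin1 bin2 indexes) := by unfold Pre_exchange_information; infer_instance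
def pvWitness_exchange_information : String × String × List Int := ("1010", "0111", [0, 2, 0])

def Spec_exchange_information (bin1 : String) (bin2 : String) (indexes : List Int) (out : String) : Prop := out = exchange_information_alt bin1 bin2 indexes
instance (bin1 : String) (bin2 : String) (indexes : List Int) (out : String) : Decidable (Spec_exchange_information bin1 bin2 indexes out) := by unfold Spec_exchange_information; infer_instance

-- ===== CLAIM (what is proved, stated in full; the proofs are below) =====
def Claim_equal_exchange_information : Prop := ∀ (bin1 : String) (bin2 : String) (indexes : List Int), Dom_exchange_information bin1 bin2 indexes → Pre_exchange_information bin1 bin2 indexes → Spec_exchange_information bin1 bin2 indexes (exchange_information bin1 bin2 indexes)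

-- ===== LEMMAS AND PROOFS =====
theorem exchangeLoopA_length (bin2 chars : List Char) (idxs : List Int)
    (h : ∀ i ∈ idxs, 0 ≤ i ∧ i < (chars.length : Int)) :
    (exchangeLoopA chars bin2 idxs).length = chars.length := by
  induction idxs generalizing chars with
  | nil => rfl
  | cons i rest ih =>
      have hi := h i (by simp)
      rw [exchangeLoopA, if_pos hi]
      rw [ih]
      · simp [PySem.List.length_pySetD]
      · intro j hj
        have := h j (by simp [hj])
        simpa [PySem.List.length_pySetD] using this

theorem exchangeLoopA_getD (bin2 chars : List Char) (idxs : List Int)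
    (h : ∀ i ∈ idxs, 0 ≤ i ∧ i < (chars.length : Int)) (k : Nat) :
    (exchangeLoopA chars bin2 idxs).getD k ' ' =
      if (k : Int) ∈ idxs then (PySem.List.pyGet? bin2 (k : Int)).getD ' '
      else chars.getD k ' ' := by
  induction idxs generalizing chars with
  | nil => simp [exchangeLoopA]
  | cons i rest ih =>
      have hi := h i (by simp)
      rw [exchangeLoopA, if_pos hi]
      have hrest : ∀ j ∈ rest, 0 ≤ j ∧ j < ((PySem.List.pySetD chars i ((PySem.List.pyGet? bin2 i).getD ' ')).length : Int) := by
        intro j hj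
        have := h j (by simp [hj])
        simpa [PySem.List.length_pySetD] using this
      rw [ih _ hrest]
      by_cases hk : (k : Int) ∈ rest
      · simp [hk]
      · simp only [hk, if_false, List.mem_cons, or_false]
        rw [PySem.List.pySetD_of_nonneg _ _ hi.1]
        by_cases he : (k : Int) = i
        · subst he
          have hkc : k < chars.length := by omega
          simp [List.getD, List.getElem?_set, hkc]
        · have hne : i.toNat ≠ k := by omega
          simp [he, List.getD, List.getElem?_set_ne hne]

-- ===== VERDICT (by name: the statement is the Claim_ definition above) =====
set_option maxHeartbeats 1000000 in
theorem exchange_information_spec : Claim_equal_exchange_information := by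
  intro bin1 bin2 indexes _ hpre
  obtain ⟨hlen, hidx⟩ := hpre
  unfold Spec_exchange_information exchange_information exchange_information_alt
  rw [if_neg (by omega), if_neg (by omega)]
  rw [if_neg (by simp only [List.any_eq_true, decide_eq_true_eq, not_exists]; push_neg; intro i hi; exact hidx i hi)]
  apply congrArg String.mk
  apply List.ext_getElem
  · rw [exchangeLoopA_length _ _ _ hidx]; simp
  · intro k hk1 hk2
    have hk : k < bin1.toList.length := by
      rwa [exchangeLoopA_length _ _ _ hidx] at hk1
    have h1 : (exchangeLoopA bin1.toList bin2.toList indexes)[k] =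
        (exchangeLoopA bin1.toList bin2.toList indexes).getD k ' ' :=
      (List.getD_eq_getElem _ _ hk1).symm
    have hik : k < (List.range bin1.toList.length).length := by simpa using hk
    rw [h1, exchangeLoopA_getD _ _ _ hidx, List.getElem_map, List.getElem_range]
    have hmem : PySem.Set.contains (PySem.Set.ofList indexes) (k : Int) = decide ((k : Int) ∈ indexes) := by
      simp [PySem.Set.contains, PySem.Set.mem_ofList]
    rw [hmem]
    by_cases hm : (k : Int) ∈ indexes
    · simp [hm]
    · simp only [hm, decide_false, Bool.false_eq_true, if_false]
      have hk' : k < bin1.length := by simpa using hk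
      simp [PySem.List.pyGet?, PySem.List.pyIdx?, List.getD, hk']
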